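-- pv_equiv track=rewrite | github.com/manz/ff4 | utils/8x8vwf.py | text_to_char
-- ===== SOURCE A (Python) =====
-- def text_to_char(text):
--     ord('Z') - ord('A')
--     data = []
--     for char in text:
--         if 'A' <= char <= 'Z':
--             data.append(ord(char) - ord('A') + 0x42)
--         elif 'a' <= char <= 'z':
--             data.append(ord(char) - ord('a') + 0x42 + ord('Z') - ord('A') + 1)
--         elif char == ' ':
--             data.append(0xFF)
--     return data
-- ===== SOURCE B (Python) =====
-- def text_to_char(text):
--     # Split on spaces first (each boundary becomes one 0xFF separator), then map
--     # each word's ASCII letters by pure arithmetic: uppercase -> ord+1, lowercase -> ord-5.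
--     chunks = [
--         [ord(c) + (1 if c <= 'Z' else -5)
--          for c in word if c.isascii() and c.isalpha()]
--         for word in text.split(' ')
--     ]
--     out = chunks[0]
--     for chunk in chunks[1:]:
--         out.append(0xFF)
--         out += chunk
--     return out
-- ===== Notes on version B (the rewrite author's own statement) =====
-- stated objective: alternative
-- what changed: Instead of a single loop with three per-character branches, B splits the text on spaces (str.split), maps each word's ASCII letters by collapsed arithmetic (ord+1 for uppercase, ord-5 for lowercase), and joins the word chunks with 0xFF separators.
import Mathlib
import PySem

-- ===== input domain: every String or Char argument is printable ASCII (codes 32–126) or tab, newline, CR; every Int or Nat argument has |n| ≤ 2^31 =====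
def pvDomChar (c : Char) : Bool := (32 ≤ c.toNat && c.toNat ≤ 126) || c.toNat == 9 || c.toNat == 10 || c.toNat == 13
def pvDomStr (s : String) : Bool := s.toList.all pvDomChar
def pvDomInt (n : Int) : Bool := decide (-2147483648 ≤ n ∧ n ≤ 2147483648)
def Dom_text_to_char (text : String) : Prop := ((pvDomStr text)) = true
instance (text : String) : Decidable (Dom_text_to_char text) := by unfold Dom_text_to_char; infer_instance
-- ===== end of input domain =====

-- B replaces A's single loop with three per-character branches by a split-on-space pass
-- (spaces become 0xFF separators joining word chunks) plus collapsed ord arithmetic per letter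
-- (alternative decomposition; same O(n) cost).


-- ===== PORT A =====
def text_to_char (text : String) : List Int :=
  text.toList.foldl (fun data char =>
    if 'A' ≤ char ∧ char ≤ 'Z' then
      data ++ [((char.toNat : Int) - 65 + 0x42)]
    else if 'a' ≤ char ∧ char ≤ 'z' then
      data ++ [((char.toNat : Int) - 97 + 0x42 + 90 - 65 + 1)]
    else if char = ' ' then
      data ++ [(0xFF : Int)]
    else data) []

-- ===== PORT B =====
-- '[ord(c) + (1 if c <= 'Z' else -5) for c in word if c.isascii() and c.isalpha()]';
-- 'c.isascii() and c.isalpha()' is exactly the ASCII-letter ranges written out here.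
def pvMapWord (w : List Char) : List Int :=
  w.filterMap (fun c =>
    if (65 ≤ c.toNat ∧ c.toNat ≤ 90) ∨ (97 ≤ c.toNat ∧ c.toNat ≤ 122) then
      some ((c.toNat : Int) + (if c ≤ 'Z' then 1 else -5))
    else none)

def text_to_char_alt (text : String) : List Int :=
  let chunks := (PySem.Chars.splitOn text.toList [' ']).map pvMapWord
  match chunks with
  | [] => []   -- unreachable: split never returns an empty list (totality guard)
  | h :: t => t.foldl (fun out chunk => out ++ [(0xFF : Int)] ++ chunk) h

-- ===== PRECONDITION & SPEC =====
def Spec_text_to_char (text : String) (out : List Int) : Prop := out = text_to_char_alt text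
instance (text : String) (out : List Int) : Decidable (Spec_text_to_char text out) := by unfold Spec_text_to_char; infer_instance

-- ===== CLAIM (what is proved, stated in full; the proofs are below) =====
def Claim_equal_text_to_char : Prop := ∀ (text : String), Dom_text_to_char text → Spec_text_to_char text (text_to_char text)

-- ===== LEMMAS AND PROOFS =====

-- A's per-character step as an option (some = appended value, none = skipped)
def pvStepA (char : Char) : Option Int :=
  if 'A' ≤ char ∧ char ≤ 'Z' then some ((char.toNat : Int) - 65 + 0x42)
  else if 'a' ≤ char ∧ char ≤ 'z' then some ((char.toNat : Int) - 97 + 0x42 + 90 - 65 + 1)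
  else if char = ' ' then some (0xFF : Int)
  else none

theorem pvFoldA_eq (l : List Char) (acc : List Int) :
    l.foldl (fun data char =>
      if 'A' ≤ char ∧ char ≤ 'Z' then data ++ [((char.toNat : Int) - 65 + 0x42)]
      else if 'a' ≤ char ∧ char ≤ 'z' then data ++ [((char.toNat : Int) - 97 + 0x42 + 90 - 65 + 1)]
      else if char = ' ' then data ++ [(0xFF : Int)]
      else data) acc = acc ++ l.filterMap pvStepA := by
  induction l generalizing acc with
  | nil => simp
  | cons c cs ih =>
    simp only [List.foldl_cons, ih, pvStepA]
    split_ifs <;> simp [*]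

-- split-on-one-space, structurally
def pvSp : List Char → List (List Char)
  | [] => [[]]
  | c :: t => if c = ' ' then [] :: pvSp t else (pvSp t).modifyHead (c :: ·)

theorem pvSp_ne_nil (l : List Char) : pvSp l ≠ [] := by
  cases l with
  | nil => simp [pvSp]
  | cons c t =>
    simp only [pvSp]
    split_ifs
    · simp
    · cases h : pvSp t with
      | nil => exact absurd h (pvSp_ne_nil t)
      | cons a b => simp [List.modifyHead]

theorem pvSp_cons_exists (l : List Char) : ∃ h t, pvSp l = h :: t := by
  cases hs : pvSp l with
  | nil => exact absurd hs (pvSp_ne_nil l)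
  | cons a b => exact ⟨a, b, rfl⟩

theorem pvGo_eq (fuel : Nat) (l cur : List Char) (acc : List (List Char))
    (hf : l.length < fuel) :
    PySem.Chars.splitOn.go [' '] fuel l cur acc
      = acc.reverse ++ (pvSp l).modifyHead (cur.reverse ++ ·) := by
  induction fuel generalizing l cur acc with
  | zero => omega
  | succ fuel ih =>
    cases l with
    | nil => simp [PySem.Chars.splitOn.go, pvSp, List.modifyHead]
    | cons c rest =>
      by_cases hc : c = ' '
      · subst hc
        have hp : ([' '].isPrefixOf (' ' :: rest)) = true := by simp [List.isPrefixOf]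
        simp only [PySem.Chars.splitOn.go, hp, if_pos, List.length_cons, List.length_nil,
          List.drop_succ_cons, List.drop_zero]
        rw [ih rest [] ((cur.reverse) :: acc) (by simpa using Nat.lt_of_succ_lt_succ hf)]
        obtain ⟨h, t, hh⟩ := pvSp_cons_exists rest
        simp [pvSp, hh, List.modifyHead]
      · have hp : ([' '].isPrefixOf (c :: rest)) = false := by
          simp [List.isPrefixOf]; intro h; exact absurd h.symm hc
        simp only [PySem.Chars.splitOn.go, hp]
        rw [if_neg (by simp [hp])]
        rw [ih rest (c :: cur) acc (by simpa using Nat.lt_of_succ_lt_succ hf)]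
        obtain ⟨h, t, hh⟩ := pvSp_cons_exists rest
        simp [pvSp, hc, hh, List.modifyHead]

theorem pvSplitOn_eq (l : List Char) : PySem.Chars.splitOn l [' '] = pvSp l := by
  show PySem.Chars.splitOn.go [' '] (l.length + 1) l [] [] = pvSp l
  rw [pvGo_eq (l.length + 1) l [] [] (Nat.lt_succ_self _)]
  obtain ⟨h, t, hh⟩ := pvSp_cons_exists l
  simp [hh, List.modifyHead]

-- B's per-letter step; pvMapWord IS filterMap of it (definitionally)
def pvStepB (c : Char) : Option Int :=
  if (65 ≤ c.toNat ∧ c.toNat ≤ 90) ∨ (97 ≤ c.toNat ∧ c.toNat ≤ 122) then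
    some ((c.toNat : Int) + (if c ≤ 'Z' then 1 else -5))
  else none

theorem pvMapWord_eq (w : List Char) : pvMapWord w = w.filterMap pvStepB := rfl

theorem pvStep_agree (c : Char) (hc : c ≠ ' ') : pvStepA c = pvStepB c := by
  have hA : ('A' ≤ c) ↔ 65 ≤ c.toNat := by
    rw [Char.le_def, UInt32.le_iff_toNat_le]; exact Iff.rfl
  have hZ : (c ≤ 'Z') ↔ c.toNat ≤ 90 := by
    rw [Char.le_def, UInt32.le_iff_toNat_le]; exact Iff.rfl
  have ha : ('a' ≤ c) ↔ 97 ≤ c.toNat := by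
    rw [Char.le_def, UInt32.le_iff_toNat_le]; exact Iff.rfl
  have hz : (c ≤ 'z') ↔ c.toNat ≤ 122 := by
    rw [Char.le_def, UInt32.le_iff_toNat_le]; exact Iff.rfl
  simp only [pvStepA, pvStepB, hA, hZ, ha, hz, if_neg hc]
  split_ifs <;> first | omega | (simp only [Option.some.injEq]; try omega)

theorem pvStepA_space : pvStepA ' ' = some 255 := by decide

-- the joining fold appends 0xFF-prefixed chunks
theorem pvAssemble_eq (t : List (List Int)) (h : List Int) :
    t.foldl (fun out chunk => out ++ [(0xFF : Int)] ++ chunk) h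
      = h ++ (t.map (fun ch => (255 : Int) :: ch)).flatten := by
  induction t generalizing h with
  | nil => simp
  | cons a b ih => simp [ih]

def pvAsm : List (List Int) → List Int
  | [] => []
  | h :: t => h ++ (t.map (fun ch => (255 : Int) :: ch)).flatten

theorem pvMain (l : List Char) : pvAsm ((pvSp l).map pvMapWord) = l.filterMap pvStepA := by
  induction l with
  | nil => simp [pvSp, pvAsm, pvMapWord_eq]
  | cons c rest ih =>
    obtain ⟨h, t, hh⟩ := pvSp_cons_exists rest
    rw [hh] at ih
    simp only [List.map_cons, pvAsm, pvMapWord_eq] at ih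
    by_cases hc : c = ' '
    · subst hc
      simp only [pvSp, if_pos rfl, List.map_cons, pvAsm, hh, List.map_cons,
        List.flatten_cons, pvMapWord_eq, List.filterMap_nil, List.nil_append,
        List.filterMap_cons, pvStepA_space]
      simp [← ih, pvMapWord_eq, Function.comp]
    · simp only [pvSp, if_neg hc, hh, List.modifyHead, List.map_cons, pvAsm,
        pvMapWord_eq, List.filterMap_cons, pvStep_agree c hc]
      cases hb : pvStepB c with
      | none => simpa [hb] using ih
      | some v => simpa [hb] using ih

-- ===== VERDICT (by name: the statement is the Claim_ definition above) =====
theorem text_to_char_spec : Claim_equal_text_to_char := by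
  intro text _
  unfold Spec_text_to_char text_to_char text_to_char_alt
  rw [pvFoldA_eq, List.nil_append, pvSplitOn_eq, ← pvMain]
  cases h : (pvSp text.toList).map pvMapWord with
  | nil => simp [pvAsm]
  | cons a b => simp [pvAsm, pvAssemble_eq]
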